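-- pv_equiv track=rewrite | github.com/guardkit/guardkit | installer/core/lib/pattern_generator.py | _find_method_with_keywords
-- ===== SOURCE A (Python) =====
-- from typing import List, Dict, Optional, Tuple
--
-- def _find_method_with_keywords(
--
--     lines: List[str],
--     keywords: List[str],
--     skip_constructors: bool = False
-- ) -> List[str]:
--     """
--     Find a method containing keywords.
--
--     Args:
--         lines: File content lines
--         keywords: Keywords to search for
--         skip_constructors: If True, skip constructor methods
--
--     Returns:
--         Method lines or empty list if not found
--     """
--     in_method = False
--     method_lines = []
--     brace_count = 0
--
--     for i, line in enumerate(lines):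
--         # Check if line contains any keyword and looks like method signature
--         if not in_method:
--             line_lower = line.lower()
--             if any(keyword.lower() in line_lower for keyword in keywords):
--                 # Check if it's a method declaration (has parentheses)
--                 if '(' in line and ('{' in line or i + 1 < len(lines)):
--                     # Skip constructors if requested (they have class name in signature)
--                     if skip_constructors:
--                         # Simple heuristic: constructors often have no return type
--                         # and method name matches class name pattern
--                         if not any(ret_type in line for ret_type in ['Task', 'ErrorOr', 'async', 'public void', 'public int', 'public string', 'IEnumerable']):
--                             continue
--
--                     in_method = True
--                     method_lines.append(line)
--                     brace_count += line.count('{') - line.count('}')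
--                     continue
--
--         if in_method:
--             method_lines.append(line)
--             brace_count += line.count('{') - line.count('}')
--
--             # Stop when method ends (braces balanced)
--             if brace_count == 0 and len(method_lines) > 1:
--                 break
--
--     return method_lines
-- ===== SOURCE B (Python) =====
-- def _find_method_with_keywords(lines, keywords, skip_constructors=False):
--     """Index-based version: locate the start index, then cut the block by a
--     prefix-sum of brace depths and return a slice (no state machine, no
--     accumulator list)."""
--     markers = ['Task', 'ErrorOr', 'async', 'public void', 'public int',
--                'public string', 'IEnumerable']
--
--     def matches(i, line):
--         low = line.lower()
--         return (any(k.lower() in low for k in keywords)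
--                 and '(' in line
--                 and ('{' in line or i + 1 < len(lines))
--                 and (not skip_constructors
--                      or any(m in line for m in markers)))
--
--     start = next((i for i, l in enumerate(lines) if matches(i, l)), None)
--     if start is None:
--         return []
--     block = lines[start:]
--     depths = []
--     d = 0
--     for l in block:
--         d += l.count('{') - l.count('}')
--         depths.append(d)
--     end = next((j for j in range(1, len(block)) if depths[j] == 0),
--                len(block) - 1)
--     return block[:end + 1]
-- ===== Notes on version B (the rewrite author's own statement) =====
-- stated objective: alternative
-- what changed: Replaced the flag-based state machine that appends into an accumulator with an index/slice formulation: find the start index with a single per-line predicate, compute a prefix-sum array of per-line brace depths over the remaining block, locate the first balanced position in that array, and return one slice of the input.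
import Mathlib
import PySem

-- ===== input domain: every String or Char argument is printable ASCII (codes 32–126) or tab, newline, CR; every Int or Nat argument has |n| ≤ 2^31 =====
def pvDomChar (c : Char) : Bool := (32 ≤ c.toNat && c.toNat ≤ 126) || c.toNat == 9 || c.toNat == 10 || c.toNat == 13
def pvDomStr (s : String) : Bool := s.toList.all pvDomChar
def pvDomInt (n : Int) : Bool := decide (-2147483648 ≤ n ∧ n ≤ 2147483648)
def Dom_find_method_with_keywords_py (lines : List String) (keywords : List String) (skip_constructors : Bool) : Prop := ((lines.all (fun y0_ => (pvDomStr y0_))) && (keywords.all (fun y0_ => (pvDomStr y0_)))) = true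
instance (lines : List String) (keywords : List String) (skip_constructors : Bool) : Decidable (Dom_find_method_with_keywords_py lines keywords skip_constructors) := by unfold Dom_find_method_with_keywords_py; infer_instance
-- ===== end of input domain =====

-- B replaces A's state machine with an index/slice formulation (find start index,
-- prefix-sum the brace depths, cut by one slice); same return values everywhere.

-- ===== PORT A =====
-- the return-type marker list of A
def pvRetTypes : List String := ["Task", "ErrorOr", "async", "public void", "public int", "public string", "IEnumerable"]

-- brace delta of one line: line.count('{') - line.count('}')
def pvDelta (line : String) : Int := (PySem.Str.count line "{" : Int) - (PySem.Str.count line "}" : Int)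

-- A's single loop: state (in_method, method_lines, brace_count); i is the enumerate index, n = len(lines)
def pvLoopA (keywords : List String) (skip_constructors : Bool) (n : Nat) :
    List String → Nat → Bool → List String → Int → List String
  | [], _, _, acc, _ => acc
  | line :: rest, i, inm, acc, bc =>
    if !inm then
      let low := PySem.Str.lower line
      if keywords.any (fun kw => PySem.Str.isIn (PySem.Str.lower kw) low) then
        if PySem.Str.isIn "(" line && (PySem.Str.isIn "{" line || decide (i + 1 < n)) then
          if skip_constructors && !(pvRetTypes.any (fun r => PySem.Str.isIn r line)) then
            pvLoopA keywords skip_constructors n rest (i + 1) inm acc bc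
          else
            pvLoopA keywords skip_constructors n rest (i + 1) true (acc ++ [line])
              (bc + pvDelta line)
        else pvLoopA keywords skip_constructors n rest (i + 1) inm acc bc
      else pvLoopA keywords skip_constructors n rest (i + 1) inm acc bc
    else
      let acc' := acc ++ [line]
      let bc' := bc + pvDelta line
      if bc' == 0 && decide (acc'.length > 1) then acc'
      else pvLoopA keywords skip_constructors n rest (i + 1) true acc' bc'

def find_method_with_keywords_py (lines : List String) (keywords : List String) (skip_constructors : Bool) : List String :=
  pvLoopA keywords skip_constructors lines.length lines 0 false [] 0

-- ===== PORT B =====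
-- Source B's `matches(i, line)` predicate
def pvMatch (keywords : List String) (skip_constructors : Bool) (n : Nat) (i : Nat) (line : String) : Bool :=
  let low := PySem.Str.lower line
  (keywords.any (fun k => PySem.Str.isIn (PySem.Str.lower k) low)) &&
  PySem.Str.isIn "(" line &&
  (PySem.Str.isIn "{" line || decide (i + 1 < n)) &&
  (!skip_constructors || pvRetTypes.any (fun m => PySem.Str.isIn m line))

-- Source B's `next((i for i, l in enumerate(lines) if matches(i, l)), None)`
def pvFindStartIdx (keywords : List String) (skip_constructors : Bool) (n : Nat) :
    List String → Nat → Option Nat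
  | [], _ => none
  | line :: rest, i =>
    if pvMatch keywords skip_constructors n i line then some i
    else pvFindStartIdx keywords skip_constructors n rest (i + 1)

-- Source B's depth-accumulation loop: running prefix sums of the per-line brace deltas
def pvDepths : List Int → Int → List Int
  | [], _ => []
  | d :: rest, t => (t + d) :: pvDepths rest (t + d)

-- Source B's `next((j for j in range(1, len(block)) if depths[j] == 0), len(block)-1)`:
-- scan depths[1:] carrying the index j
def pvFindCut : List Int → Nat → Option Nat
  | [], _ => none
  | d :: rest, j => if d == 0 then some j else pvFindCut rest (j + 1)

-- Source B's phase two on `block = lines[start:]`: prefix sums, cut index, one slice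
def pvExtract (block : List String) : List String :=
  let depths := pvDepths (block.map pvDelta) 0
  let cut := (pvFindCut (depths.drop 1) 1).getD (block.length - 1)
  block.take (cut + 1)

def find_method_with_keywords_py_alt (lines : List String) (keywords : List String) (skip_constructors : Bool) : List String :=
  match pvFindStartIdx keywords skip_constructors lines.length lines 0 with
  | none => []
  | some s => pvExtract (lines.drop s)   -- lines[start:] with start a valid Nat index

-- ===== PRECONDITION & SPEC =====
def Spec_find_method_with_keywords_py (lines : List String) (keywords : List String) (skip_constructors : Bool) (out : List String) : Prop := out = find_method_with_keywords_py_alt lines keywords skip_constructors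
instance (lines : List String) (keywords : List String) (skip_constructors : Bool) (out : List String) : Decidable (Spec_find_method_with_keywords_py lines keywords skip_constructors out) := by unfold Spec_find_method_with_keywords_py; infer_instance

-- ===== CLAIM =====
def Claim_equal_find_method_with_keywords_py : Prop := ∀ (lines : List String) (keywords : List String) (skip_constructors : Bool), Dom_find_method_with_keywords_py lines keywords skip_constructors → Spec_find_method_with_keywords_py lines keywords skip_constructors (find_method_with_keywords_py lines keywords skip_constructors)

-- ===== LEMMAS AND PROOFS =====

-- shifting the starting index of the cut search shifts its result
lemma findCut_shift : ∀ (ds : List Int) (k : Nat),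
    pvFindCut ds (k + 1) = (pvFindCut ds k).map (· + 1) := by
  intro ds
  induction ds with
  | nil => intro k; rfl
  | cons d rest ih =>
    intro k
    by_cases h : (d == 0) = true
    · simp [pvFindCut, h]
    · simp [pvFindCut, h, ih]

-- A's in_method phase returns acc ++ the prefix of rest up to the first balanced depth
lemma collect_eq (keywords : List String) (skip_constructors : Bool) (n : Nat) :
    ∀ (rest : List String) (i : Nat) (acc : List String) (bc : Int), acc ≠ [] →
      pvLoopA keywords skip_constructors n rest i true acc bc =
        acc ++ rest.take ((pvFindCut (pvDepths (rest.map pvDelta) bc) 1).getD rest.length) := by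
  intro rest
  induction rest with
  | nil => intro i acc bc _; simp [pvLoopA, pvDepths, pvFindCut]
  | cons line rest ih =>
    intro i acc bc hacc
    have hlen : decide ((acc ++ [line]).length > 1) = true := by
      cases acc with
      | nil => exact absurd rfl hacc
      | cons a as => simp
    by_cases h : (bc + pvDelta line == 0) = true
    · simp only [pvLoopA, Bool.not_true, Bool.false_eq_true, if_false, h, hlen,
        Bool.and_self, if_true, List.map_cons, pvDepths, pvFindCut, Option.getD_some,
        List.take_succ_cons, List.take_zero]
    · have h' : (bc + pvDelta line == 0) = false := by simpa using h
      have e1 : pvLoopA keywords skip_constructors n (line :: rest) i true acc bc =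
          pvLoopA keywords skip_constructors n rest (i + 1) true (acc ++ [line]) (bc + pvDelta line) := by
        simp only [pvLoopA, Bool.not_true, Bool.false_eq_true, if_false, h',
          Bool.false_and, if_neg]
      have e2 : pvFindCut (pvDepths ((line :: rest).map pvDelta) bc) 1 =
          (pvFindCut (pvDepths (rest.map pvDelta) (bc + pvDelta line)) 1).map (· + 1) := by
        simp only [List.map_cons, pvDepths, pvFindCut, h', Bool.false_eq_true, if_false]
        exact findCut_shift _ 1
      rw [e1, ih (i + 1) (acc ++ [line]) (bc + pvDelta line) (by simp), e2]
      cases pvFindCut (pvDepths (rest.map pvDelta) (bc + pvDelta line)) 1 with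
      | none => simp [List.take_succ_cons]
      | some m => simp [List.take_succ_cons]

-- the found start index is at least the running index
lemma findStartIdx_ge (keywords : List String) (skip_constructors : Bool) (n : Nat) :
    ∀ (rest : List String) (i s : Nat),
      pvFindStartIdx keywords skip_constructors n rest i = some s → i ≤ s := by
  intro rest
  induction rest with
  | nil => intro i s h; exact absurd h (by simp [pvFindStartIdx])
  | cons line rest ih =>
    intro i s h
    by_cases hm : pvMatch keywords skip_constructors n i line = true
    · simp [pvFindStartIdx, hm] at h; omega
    · simp only [pvFindStartIdx, hm, Bool.false_eq_true, if_false] at h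
      have := ih (i + 1) s h; omega

-- A's search phase equals B's find-index-then-extract
lemma search_eq (keywords : List String) (skip_constructors : Bool) (n : Nat) :
    ∀ (rest : List String) (i : Nat),
      pvLoopA keywords skip_constructors n rest i false [] 0 =
        (match pvFindStartIdx keywords skip_constructors n rest i with
         | none => []
         | some s => pvExtract (rest.drop (s - i))) := by
  intro rest
  induction rest with
  | nil => intro i; rfl
  | cons line rest ih =>
    intro i
    -- when the predicate is false, both sides advance to rest at index i+1
    have hRHS : pvMatch keywords skip_constructors n i line = false →
        (match pvFindStartIdx keywords skip_constructors n rest (i + 1) with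
         | none => []
         | some s => pvExtract (rest.drop (s - (i + 1)))) =
        (match pvFindStartIdx keywords skip_constructors n (line :: rest) i with
         | none => []
         | some s => pvExtract ((line :: rest).drop (s - i))) := by
      intro hmf
      rw [show pvFindStartIdx keywords skip_constructors n (line :: rest) i =
          pvFindStartIdx keywords skip_constructors n rest (i + 1) by
        simp only [pvFindStartIdx, hmf, Bool.false_eq_true, if_false]]
      cases hfs : pvFindStartIdx keywords skip_constructors n rest (i + 1) with
      | none => rfl
      | some s =>
        have hge := findStartIdx_ge keywords skip_constructors n rest (i + 1) s hfs
        have hdrop : (line :: rest).drop (s - i) = rest.drop (s - (i + 1)) := by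
          have hsi : s - i = (s - (i + 1)) + 1 := by omega
          rw [hsi]; rfl
        simp only [hdrop]
    by_cases hkw : (keywords.any fun kw =>
        PySem.Str.isIn (PySem.Str.lower kw) (PySem.Str.lower line)) = true
    · by_cases hp1 : PySem.Str.isIn "(" line = true
      · by_cases hp2 : (PySem.Str.isIn "{" line || decide (i + 1 < n)) = true
        · by_cases hret : (!skip_constructors || pvRetTypes.any fun r => PySem.Str.isIn r line) = true
          · -- all conditions hold: A enters the method, B extracts from here
            have hsk : (skip_constructors && !(pvRetTypes.any fun r => PySem.Str.isIn r line)) = false := by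
              rcases Bool.eq_false_or_eq_true skip_constructors with h | h
              · rw [h] at hret
                rw [Bool.not_true, Bool.false_or] at hret
                rw [h, hret, Bool.not_true, Bool.and_false]
              · rw [h, Bool.false_and]
            have hm' : pvMatch keywords skip_constructors n i line = true := by
              unfold pvMatch
              simp only [hkw, hp1, hp2, hret, Bool.and_self, Bool.true_and]
            have stepA : pvLoopA keywords skip_constructors n (line :: rest) i false [] 0 =
                pvLoopA keywords skip_constructors n rest (i + 1) true [line] (0 + pvDelta line) := by
              simp only [pvLoopA, Bool.not_false, hkw, hp1, hp2, Bool.true_and, Bool.and_self,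
                if_true, hsk, Bool.false_eq_true, if_false, List.nil_append]
            have stepB : pvFindStartIdx keywords skip_constructors n (line :: rest) i = some i := by
              simp only [pvFindStartIdx, hm', if_true]
            rw [stepA, stepB,
              collect_eq keywords skip_constructors n rest (i + 1) [line] (0 + pvDelta line) (by simp)]
            show _ = pvExtract ((line :: rest).drop (i - i))
            rw [Nat.sub_self, List.drop_zero]
            unfold pvExtract
            simp only [List.map_cons, pvDepths, List.drop_one, List.tail_cons,
              List.length_cons, Nat.add_sub_cancel]
            cases pvFindCut (pvDepths (rest.map pvDelta) (0 + pvDelta line)) 1 with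
            | none => simp [List.take_succ_cons]
            | some m => simp [List.take_succ_cons]
          · -- constructor skipped: keep searching
            have hsk : (skip_constructors && !(pvRetTypes.any fun r => PySem.Str.isIn r line)) = true := by
              rcases Bool.eq_false_or_eq_true skip_constructors with h | h
              · rw [h] at hret
                rw [Bool.not_true, Bool.false_or] at hret
                rw [h, Bool.true_and, Bool.eq_false_iff.mpr hret, Bool.not_false]
              · rw [h] at hret; rw [Bool.not_false] at hret; exact absurd (Bool.true_or _) hret
            have hmf : pvMatch keywords skip_constructors n i line = false := by
              unfold pvMatch
              simp only [hkw, hp1, hp2, Bool.true_and, Bool.and_self,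
                Bool.eq_false_iff.mpr hret, Bool.and_false]
            have stepA : pvLoopA keywords skip_constructors n (line :: rest) i false [] 0 =
                pvLoopA keywords skip_constructors n rest (i + 1) false [] 0 := by
              simp only [pvLoopA, Bool.not_false, hkw, hp1, hp2, Bool.true_and, Bool.and_self,
                if_true, hsk, Bool.false_eq_true]
            rw [stepA, ih (i + 1)]
            exact hRHS hmf
        · have hmf : pvMatch keywords skip_constructors n i line = false := by
            unfold pvMatch
            simp only [hkw, hp1, Bool.true_and, Bool.eq_false_iff.mpr hp2, Bool.false_and,
              Bool.and_false]
          have stepA : pvLoopA keywords skip_constructors n (line :: rest) i false [] 0 =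
              pvLoopA keywords skip_constructors n rest (i + 1) false [] 0 := by
            simp only [pvLoopA, Bool.not_false, hkw, hp1, Bool.true_and, if_true,
              Bool.eq_false_iff.mpr hp2, Bool.and_false, Bool.false_eq_true, if_false]
          rw [stepA, ih (i + 1)]
          exact hRHS hmf
      · have hmf : pvMatch keywords skip_constructors n i line = false := by
          unfold pvMatch
          simp only [hkw, Bool.true_and, Bool.eq_false_iff.mpr hp1, Bool.false_and]
        have stepA : pvLoopA keywords skip_constructors n (line :: rest) i false [] 0 =
            pvLoopA keywords skip_constructors n rest (i + 1) false [] 0 := by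
          simp only [pvLoopA, Bool.not_false, hkw, if_true, Bool.eq_false_iff.mpr hp1,
            Bool.false_and, Bool.false_eq_true, if_false]
        rw [stepA, ih (i + 1)]
        exact hRHS hmf
    · have hmf : pvMatch keywords skip_constructors n i line = false := by
        unfold pvMatch
        simp only [Bool.eq_false_iff.mpr hkw, Bool.false_and]
      have stepA : pvLoopA keywords skip_constructors n (line :: rest) i false [] 0 =
          pvLoopA keywords skip_constructors n rest (i + 1) false [] 0 := by
        simp only [pvLoopA, Bool.not_false, Bool.eq_false_iff.mpr hkw, Bool.false_eq_true,
          if_false, if_true]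
      rw [stepA, ih (i + 1)]
      exact hRHS hmf

-- ===== VERDICT =====
theorem find_method_with_keywords_py_spec : Claim_equal_find_method_with_keywords_py := by
  intro lines keywords skip_constructors _
  unfold Spec_find_method_with_keywords_py find_method_with_keywords_py find_method_with_keywords_py_alt
  rw [search_eq]
  cases pvFindStartIdx keywords skip_constructors lines.length lines 0 with
  | none => rfl
  | some s => simp
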